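-- pv_equiv track=rewrite | github.com/Aden-Q/LeetCode | src/encrypted_words.py | encrptUtils
-- ===== SOURCE A (Python) =====
-- def encrptUtils(s):
--   # base case
--   if len(s) <= 1:
--     return s
--
--   cur_s = ""
--   if len(s) % 2 == 0:
--     idx = (len(s) - 1) // 2
--   else:
--     idx = len(s) // 2
--
--   return s[idx] + encrptUtils(s[0:idx]) + encrptUtils(s[idx+1:])
-- ===== SOURCE B (Python) =====
-- def encrptUtils(s):
--     # Iterative: explicit stack of substrings, emitted in preorder.
--     res = []
--     stack = [s]
--     while stack:
--         t = stack.pop()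
--         if len(t) <= 1:
--             res.append(t)
--             continue
--         mid = (len(t) - 1) // 2
--         res.append(t[mid])
--         stack.append(t[mid + 1:])
--         stack.append(t[:mid])
--     return "".join(res)
-- ===== Notes on version B (the rewrite author's own statement) =====
-- stated objective: alternative
-- what changed: Replaces the recursive midpoint-splitting (with an even/odd branch for the index) by an iterative loop over an explicit stack of substrings that emits characters in preorder and joins a result list at the end.
import Mathlib
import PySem

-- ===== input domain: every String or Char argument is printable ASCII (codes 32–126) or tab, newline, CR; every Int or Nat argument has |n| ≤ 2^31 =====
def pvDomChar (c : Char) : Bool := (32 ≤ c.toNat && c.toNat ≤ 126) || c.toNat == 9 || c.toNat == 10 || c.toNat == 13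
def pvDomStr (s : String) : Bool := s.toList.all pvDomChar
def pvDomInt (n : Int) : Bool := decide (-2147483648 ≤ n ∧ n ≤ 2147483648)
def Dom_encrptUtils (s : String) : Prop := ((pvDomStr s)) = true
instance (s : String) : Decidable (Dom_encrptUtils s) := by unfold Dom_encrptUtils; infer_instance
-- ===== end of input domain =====

-- B replaces A's recursion by an explicit stack of substrings emitted in preorder (alternative decomposition, same result).

-- ===== PORT A =====
-- Recursive midpoint split. The fuel parameter (cs.length, strictly decreasing on
-- each recursive call) only makes the recursion structural; the fuel-0 branch is
-- never reached when length ≤ fuel. s[idx] is always in range (2 ≤ len,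
-- idx ≤ (len-1)/2 < len), so pyGet?.toList is exact (Python never raises here).
-- All // and % are on nonnegative Nats here, where Lean's / and % agree with Python.
-- Slices s[0:idx] / s[idx+1:] with nonnegative in-range bounds are exactly take / drop.
def encAF : Nat → List Char → List Char
  | 0, _ => []
  | fuel + 1, cs =>
    if cs.length ≤ 1 then cs
    else
      let idx := if cs.length % 2 = 0 then (cs.length - 1) / 2 else cs.length / 2
      (PySem.List.pyGet? cs (idx : Int)).toList ++ encAF fuel (cs.take idx) ++ encAF fuel (cs.drop (idx + 1))

def encA (cs : List Char) : List Char := encAF cs.length cs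

def encrptUtils (s : String) : String := String.ofList (encA s.toList)

-- ===== PORT B =====
-- The while loop: stack top is the list head (push/pop at the same end, as Python's
-- append/pop); res collects the emitted pieces and "".join is flatten at the end.
-- The fuel (sum of 2*len+1 over the stack, strictly decreasing each iteration) only
-- makes the loop structural; the fuel-0 branch is never reached when measure ≤ fuel.
def encBloopF : Nat → List (List Char) → List (List Char) → List (List Char)
  | _, [], res => res
  | 0, _, res => res
  | fuel + 1, t :: rest, res =>
    if t.length ≤ 1 then encBloopF fuel rest (res ++ [t])
    else
      let mid := (t.length - 1) / 2
      encBloopF fuel (t.take mid :: t.drop (mid + 1) :: rest) (res ++ [(PySem.List.pyGet? t (mid : Int)).toList])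

def pvMeasure (stack : List (List Char)) : Nat := (stack.map (fun t => 2 * t.length + 1)).sum

def encrptUtils_alt (s : String) : String :=
  String.ofList (encBloopF (pvMeasure [s.toList]) [s.toList] []).flatten

-- ===== PRECONDITION & SPEC =====
def Spec_encrptUtils (s : String) (out : String) : Prop := out = encrptUtils_alt s
instance (s : String) (out : String) : Decidable (Spec_encrptUtils s out) := by unfold Spec_encrptUtils; infer_instance

-- ===== CLAIM (what is proved, stated in full; the proofs are below) =====
def Claim_equal_encrptUtils : Prop := ∀ (s : String), Dom_encrptUtils s → Spec_encrptUtils s (encrptUtils s)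

-- ===== LEMMAS AND PROOFS =====

theorem encAF_step (f : Nat) (cs : List Char) (h : ¬ cs.length ≤ 1) :
    encAF (f + 1) cs = (PySem.List.pyGet? cs (((cs.length - 1) / 2 : Nat) : Int)).toList
      ++ encAF f (cs.take ((cs.length - 1) / 2)) ++ encAF f (cs.drop ((cs.length - 1) / 2 + 1)) := by
  have hidx : (if cs.length % 2 = 0 then (cs.length - 1) / 2 else cs.length / 2)
      = (cs.length - 1) / 2 := by split <;> omega
  simp only [encAF, if_neg h, hidx]

-- enough fuel ⇒ the fuel amount is irrelevant
theorem encAF_congr : ∀ (f1 f2 : Nat) (cs : List Char), cs.length ≤ f1 → cs.length ≤ f2 →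
    encAF f1 cs = encAF f2 cs := by
  intro f1
  induction f1 with
  | zero =>
      intro f2 cs h1 _
      have : cs = [] := List.length_eq_zero_iff.mp (Nat.le_zero.mp h1)
      subst this
      cases f2 <;> simp [encAF]
  | succ k ih =>
      intro f2 cs h1 h2
      cases f2 with
      | zero =>
          have : cs = [] := List.length_eq_zero_iff.mp (Nat.le_zero.mp h2)
          subst this
          simp [encAF]
      | succ j =>
          by_cases hb : cs.length ≤ 1
          · simp [encAF, hb]
          · rw [encAF_step k cs hb, encAF_step j cs hb]
            rw [ih j (cs.take ((cs.length - 1) / 2))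
                  (by simp only [List.length_take]; omega)
                  (by simp only [List.length_take]; omega),
                ih j (cs.drop ((cs.length - 1) / 2 + 1))
                  (by simp only [List.length_drop]; omega)
                  (by simp only [List.length_drop]; omega)]

theorem encA_base (t : List Char) (h : t.length ≤ 1) : encA t = t := by
  cases t with
  | nil => rfl
  | cons a l =>
      have : l = [] := by
        simp only [List.length_cons] at h
        exact List.length_eq_zero_iff.mp (by omega)
      subst this
      rfl

-- A's even/odd branch picks the same index (len-1)/2 in both cases
theorem encA_split (cs : List Char) (h : ¬ cs.length ≤ 1) :
    encA cs = (PySem.List.pyGet? cs (((cs.length - 1) / 2 : Nat) : Int)).toList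
      ++ encA (cs.take ((cs.length - 1) / 2)) ++ encA (cs.drop ((cs.length - 1) / 2 + 1)) := by
  unfold encA
  have h1 : encAF cs.length cs = encAF (cs.length - 1 + 1) cs := by congr 1; omega
  rw [h1, encAF_step (cs.length - 1) cs h]
  congr 1
  · congr 1
    exact encAF_congr _ _ _ (by simp only [List.length_take]; omega) (le_refl _)
  · exact encAF_congr _ _ _ (by simp only [List.length_drop]; omega) (le_refl _)

theorem encBloopF_low (f : Nat) (t : List Char) (rest res : List (List Char))
    (h : t.length ≤ 1) :
    encBloopF (f + 1) (t :: rest) res = encBloopF f rest (res ++ [t]) := by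
  simp only [encBloopF, if_pos h]

theorem encBloopF_high (f : Nat) (t : List Char) (rest res : List (List Char))
    (h : ¬ t.length ≤ 1) :
    encBloopF (f + 1) (t :: rest) res
      = encBloopF f (t.take ((t.length - 1) / 2) :: t.drop ((t.length - 1) / 2 + 1) :: rest)
          (res ++ [(PySem.List.pyGet? t (((t.length - 1) / 2 : Nat) : Int)).toList]) := by
  simp only [encBloopF, if_neg h]

-- loop invariant: with enough fuel the stack is processed top-first,
-- each entry contributing encA of it
theorem encBloopF_flatten : ∀ (fuel : Nat) (stack res : List (List Char)),
    pvMeasure stack ≤ fuel →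
    (encBloopF fuel stack res).flatten = res.flatten ++ (stack.map encA).flatten := by
  intro fuel
  induction fuel with
  | zero =>
      intro stack res h
      cases stack with
      | nil => simp [encBloopF]
      | cons t rest =>
          exfalso
          simp only [pvMeasure, List.map_cons, List.sum_cons] at h
          omega
  | succ f ih =>
      intro stack res h
      cases stack with
      | nil => simp [encBloopF]
      | cons t rest =>
          by_cases hb : t.length ≤ 1
          · have hmeas : pvMeasure rest ≤ f := by
              simp only [pvMeasure, List.map_cons, List.sum_cons] at h
              simp only [pvMeasure]
              omega
            rw [encBloopF_low f t rest res hb, ih rest (res ++ [t]) hmeas]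
            simp [encA_base t hb]
          · have hmeas : pvMeasure (t.take ((t.length - 1) / 2)
                :: t.drop ((t.length - 1) / 2 + 1) :: rest) ≤ f := by
              simp only [pvMeasure, List.map_cons, List.sum_cons, List.length_take,
                List.length_drop] at h ⊢
              omega
            rw [encBloopF_high f t rest res hb, ih _ _ hmeas]
            simp only [List.map_cons, List.flatten_cons, List.flatten_append,
              List.flatten_nil, List.append_nil, encA_split t hb, List.append_assoc]

theorem spec_aux (s : String) : encrptUtils s = encrptUtils_alt s := by
  unfold encrptUtils encrptUtils_alt
  rw [encBloopF_flatten _ _ _ (le_refl _)]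
  simp [encA]

-- ===== VERDICT (by name: the statement is the Claim_ definition above) =====
theorem encrptUtils_spec : Claim_equal_encrptUtils := by
  intro s _
  unfold Spec_encrptUtils
  exact spec_aux s
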